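-- pv_equiv track=rewrite | github.com/mallocchio/Advanced-Topics-In-Cybersecurity | Lab Sheet - Making (symmetric) crypto/structural_attacks/toy_ciphers.py | encrypt_sub_2r_spn
-- ===== SOURCE A (Python) =====
-- s_4b = [0xe, 0x5, 0xd, 0x1, 0x2, 0xf, 0xc, 0x8, 0x3, 0xa, 0x6, 0xb, 0x4, 0x9, 0x0, 0x7]
--
-- p_8b = [0,4,1,5,2,6,3,7]
--
-- k_0_8b = [0x8, 0x2]
--
-- k_1_8b = [0x1, 0x7]
--
-- def encrypt_sub_2r_spn(state):
--     state = [(state >> 4) & 0xF, state & 0xF]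
--     state = [state[i] ^ k_0_8b[i] for i in range(len(state))]
--     state = [s_4b[x] for x in state]
--     binary_str = ''.join(f"{x:04b}" for x in state)
--     permuted_str = ''.join(binary_str[i] for i in p_8b)
--     state = [int(permuted_str[:4], 2), int(permuted_str[4:], 2)]
--
--     state = [state[i] ^ k_1_8b[i] for i in range(len(state))]
--     state = [s_4b[x] for x in state]
--
--     return (state[0] << 4) | state[1]
-- ===== SOURCE B (Python) =====
-- s_4b = [0xe, 0x5, 0xd, 0x1, 0x2, 0xf, 0xc, 0x8, 0x3, 0xa, 0x6, 0xb, 0x4, 0x9, 0x0, 0x7]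
--
-- p_8b = [0,4,1,5,2,6,3,7]
--
-- k_0_8b = [0x8, 0x2]
--
-- k_1_8b = [0x1, 0x7]
--
-- def encrypt_sub_2r_spn(state):
--     # round 1: key-xor and S-box on each nibble, kept as plain ints
--     hi = s_4b[((state >> 4) & 0xF) ^ k_0_8b[0]]
--     lo = s_4b[(state & 0xF) ^ k_0_8b[1]]
--     byte = (hi << 4) | lo
--     # bit permutation done with shifts/masks: output bit (7-j) is input bit (7-p_8b[j])
--     perm = 0
--     for j, src in enumerate(p_8b):
--         perm |= ((byte >> (7 - src)) & 1) << (7 - j)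
--     # round 2
--     hi = s_4b[((perm >> 4) & 0xF) ^ k_1_8b[0]]
--     lo = s_4b[(perm & 0xF) ^ k_1_8b[1]]
--     return (hi << 4) | lo
-- ===== Notes on version B (the rewrite author's own statement) =====
-- stated objective: alternative
-- what changed: The bit permutation is done with integer shift/mask arithmetic over one byte (and nibbles are kept as plain ints throughout) instead of A's route through a binary-string join, character reordering and int(s,2) re-parsing.
import Mathlib
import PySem

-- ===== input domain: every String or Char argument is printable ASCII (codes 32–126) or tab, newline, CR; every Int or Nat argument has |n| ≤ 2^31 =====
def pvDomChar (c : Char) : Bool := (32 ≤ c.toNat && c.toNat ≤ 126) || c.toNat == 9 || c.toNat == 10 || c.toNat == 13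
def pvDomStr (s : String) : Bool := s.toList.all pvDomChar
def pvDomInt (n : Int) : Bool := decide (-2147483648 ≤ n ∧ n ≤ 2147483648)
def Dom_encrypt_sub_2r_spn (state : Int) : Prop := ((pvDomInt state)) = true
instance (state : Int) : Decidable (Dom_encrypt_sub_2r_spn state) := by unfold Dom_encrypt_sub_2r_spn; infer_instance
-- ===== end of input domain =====

-- B replaces A's character-string permutation step with pure integer bit arithmetic (shifts/masks); objective: alternative (same cost).


-- ===== PORT A =====
def s_4b : List Int := [0xe, 0x5, 0xd, 0x1, 0x2, 0xf, 0xc, 0x8, 0x3, 0xa, 0x6, 0xb, 0x4, 0x9, 0x0, 0x7]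
def p_8b : List Int := [0, 4, 1, 5, 2, 6, 3, 7]
def k_0_8b : List Int := [0x8, 0x2]
def k_1_8b : List Int := [0x1, 0x7]

-- f"{x:04b}" ported by hand (no PySem primitive for format specs); exact for 0 ≤ x < 16,
-- which is the only range it is applied to (outputs of s_4b).
def fmt04b (x : Int) : List Char :=
  [if PySem.Int.band (x >>> 3) 1 == 1 then '1' else '0',
   if PySem.Int.band (x >>> 2) 1 == 1 then '1' else '0',
   if PySem.Int.band (x >>> 1) 1 == 1 then '1' else '0',
   if PySem.Int.band x 1 == 1 then '1' else '0']

-- everything A does after its first line (which split `state` into the two nibbles `st`)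
def encrypt_rest (st : List Int) : Int :=
  let st : List Int := (PySem.List.pyRange 0 (PySem.List.len st) 1).map
    (fun i => PySem.Int.bxor (PySem.List.pyGetD st i 0) (PySem.List.pyGetD k_0_8b i 0))
  let st : List Int := st.map (fun x => PySem.List.pyGetD s_4b x 0)
  let binary_str : List Char := (st.map fmt04b).flatten
  let permuted_str : List Char := p_8b.map (fun i => PySem.List.pyGetD binary_str i ' ')
  let st : List Int := [(PySem.Int.ofCharsBase? (PySem.List.slice permuted_str none (some 4)) 2).getD 0,
                        (PySem.Int.ofCharsBase? (PySem.List.slice permuted_str (some 4) none) 2).getD 0]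
  let st : List Int := (PySem.List.pyRange 0 (PySem.List.len st) 1).map
    (fun i => PySem.Int.bxor (PySem.List.pyGetD st i 0) (PySem.List.pyGetD k_1_8b i 0))
  let st : List Int := st.map (fun x => PySem.List.pyGetD s_4b x 0)
  PySem.Int.bor (PySem.List.pyGetD st 0 0 <<< 4) (PySem.List.pyGetD st 1 0)

def encrypt_sub_2r_spn (state : Int) : Int :=
  encrypt_rest [PySem.Int.band (state >>> 4) 15, PySem.Int.band state 15]

-- ===== PORT B =====
-- B's body on the two input nibbles
def encrypt_alt_core (hn ln : Int) : Int :=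
  let hi := PySem.List.pyGetD s_4b (PySem.Int.bxor hn (PySem.List.pyGetD k_0_8b 0 0)) 0
  let lo := PySem.List.pyGetD s_4b (PySem.Int.bxor ln (PySem.List.pyGetD k_0_8b 1 0)) 0
  let byte := PySem.Int.bor (hi <<< 4) lo
  -- 'byte >> (7 - src)': src ∈ p_8b ⊆ [0,7], so the Python shift amount 7-src is the Nat (7 - src).toNat
  let perm := (PySem.List.enumerate p_8b 0).foldl
    (fun acc js => PySem.Int.bor acc (PySem.Int.band (byte >>> (7 - js.2).toNat) 1 <<< (7 - js.1).toNat)) 0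
  let hi := PySem.List.pyGetD s_4b (PySem.Int.bxor (PySem.Int.band (perm >>> 4) 15) (PySem.List.pyGetD k_1_8b 0 0)) 0
  let lo := PySem.List.pyGetD s_4b (PySem.Int.bxor (PySem.Int.band perm 15) (PySem.List.pyGetD k_1_8b 1 0)) 0
  PySem.Int.bor (hi <<< 4) lo

def encrypt_sub_2r_spn_alt (state : Int) : Int :=
  encrypt_alt_core (PySem.Int.band (state >>> 4) 15) (PySem.Int.band state 15)

-- ===== PRECONDITION & SPEC =====
def Spec_encrypt_sub_2r_spn (state : Int) (out : Int) : Prop := out = encrypt_sub_2r_spn_alt state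
instance (state : Int) (out : Int) : Decidable (Spec_encrypt_sub_2r_spn state out) := by unfold Spec_encrypt_sub_2r_spn; infer_instance

-- ===== CLAIM (what is proved, stated in full; the proofs are below) =====
def Claim_equal_encrypt_sub_2r_spn : Prop := ∀ (state : Int), Dom_encrypt_sub_2r_spn state → Spec_encrypt_sub_2r_spn state (encrypt_sub_2r_spn state)

-- ===== LEMMAS AND PROOFS =====

-- masking with 0xF always lands in [0,16), whatever the sign of x
lemma band15_bounds (x : Int) : 0 ≤ PySem.Int.band x 15 ∧ PySem.Int.band x 15 < 16 := by
  have h15 : (15 : Int).toNat = 15 := rfl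
  unfold PySem.Int.band
  split_ifs with h1 h2 h2
  · have hle : x.toNat &&& (15 : Int).toNat ≤ (15 : Int).toNat := Nat.and_le_right
    omega
  · omega
  · omega
  · omega

-- the two programs agree on each of the 256 reachable nibble pairs (kernel evaluation)
set_option maxRecDepth 100000 in
set_option maxHeartbeats 2000000 in
lemma core_eq : ∀ p : Fin 16 × Fin 16,
    encrypt_rest [(p.1 : Int), (p.2 : Int)] = encrypt_alt_core (p.1 : Int) (p.2 : Int) := by
  decide

-- ===== VERDICT (by name: the statement is the Claim_ definition above) =====
theorem encrypt_sub_2r_spn_spec : Claim_equal_encrypt_sub_2r_spn := by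
  intro s _
  unfold Spec_encrypt_sub_2r_spn encrypt_sub_2r_spn encrypt_sub_2r_spn_alt
  obtain ⟨h0, h1⟩ := band15_bounds (s >>> 4)
  obtain ⟨l0, l1⟩ := band15_bounds s
  have hh : PySem.Int.band (s >>> 4) 15 = ((⟨(PySem.Int.band (s >>> 4) 15).toNat, by omega⟩ : Fin 16) : Int) := by
    simp [Int.toNat_of_nonneg h0]
  have hl : PySem.Int.band s 15 = ((⟨(PySem.Int.band s 15).toNat, by omega⟩ : Fin 16) : Int) := by
    simp [Int.toNat_of_nonneg l0]
  rw [hh, hl]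
  exact core_eq (⟨(PySem.Int.band (s >>> 4) 15).toNat, by omega⟩, ⟨(PySem.Int.band s 15).toNat, by omega⟩)
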